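-- pv_equiv track=rewrite | github.com/asmit404/GFG_Solutions | Possible Paths in a Tree.py | maximumWeight
-- ===== SOURCE A (Python) =====
-- def maximumWeight(n, edges, q, queries):
--     store, sz = list(range(n+1)), [1] * (n+1)
--     sz[0] = 0
--
--     def find(i): return store[i] if store[i] == i else find(store[i])
--     edges.sort(key=lambda x: x[2])
--     queries = sorted(enumerate(queries), key=lambda x: x[1])
--
--     ans, acc, start = [0] * len(queries), 0, 0
--     for i, q in queries:
--         while start < len(edges) and edges[start][2] <= q:
--             x, y, _ = edges[start]
--             rx, ry = find(x), find(y)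
--             if rx != ry:
--                 acc += sz[rx]*sz[ry]
--                 sz[rx] += sz[ry]
--                 sz[ry] = 0
--                 store[ry] = rx
--             start += 1
--         ans[i] = acc
--     return ans
-- ===== SOURCE B (Python) =====
-- def maximumWeight(n, edges, q, queries):
--     # Same in-place edges.sort() as A (argument mutation preserved).
--     edges.sort(key=lambda x: x[2])
--
--     def answer(t):
--         # fresh union-find per query
--         parent = list(range(n + 1))
--         size = [1] * (n + 1)
--         size[0] = 0
--         acc = 0
--
--         def find(i):
--             while parent[i] != i:
--                 i = parent[i]
--             return i
--
--         for x, y, w in edges: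
--             if w <= t:
--                 rx, ry = find(x), find(y)
--                 if rx != ry:
--                     acc += size[rx] * size[ry]
--                     size[rx] += size[ry]
--                     size[ry] = 0
--                     parent[ry] = rx
--         return acc
--
--     return [answer(t) for t in queries]
-- ===== Notes on version B (the rewrite author's own statement) =====
-- stated objective: alternative
-- what changed: Replaces A's offline scheme (sort the queries with their indices, one shared union-find swept once over the sorted edges, answers scattered into the result by index) with an independent recomputation per query in original order: a fresh union-find is built for each threshold and every edge with weight <= threshold is unioned, accumulating the pair count.
import Mathlib
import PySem

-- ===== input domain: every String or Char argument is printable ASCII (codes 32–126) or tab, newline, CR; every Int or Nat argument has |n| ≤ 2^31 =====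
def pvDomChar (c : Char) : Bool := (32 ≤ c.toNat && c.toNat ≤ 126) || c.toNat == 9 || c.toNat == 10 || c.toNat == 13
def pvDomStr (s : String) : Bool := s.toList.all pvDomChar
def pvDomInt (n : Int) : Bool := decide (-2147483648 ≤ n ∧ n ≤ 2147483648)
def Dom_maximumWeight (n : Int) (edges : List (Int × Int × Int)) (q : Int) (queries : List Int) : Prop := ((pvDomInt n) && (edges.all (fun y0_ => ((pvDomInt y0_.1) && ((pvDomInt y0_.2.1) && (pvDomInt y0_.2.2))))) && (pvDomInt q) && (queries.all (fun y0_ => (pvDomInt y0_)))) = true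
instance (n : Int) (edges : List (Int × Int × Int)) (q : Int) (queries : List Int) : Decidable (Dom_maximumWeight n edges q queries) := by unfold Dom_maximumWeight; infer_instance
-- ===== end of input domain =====

-- B replaces A's offline sort-the-queries + single shared union-find sweep by an independent
-- fresh union-find per query in original order (alternative decomposition, not faster).
-- Both Pythons sort `edges` in place; the equivalence proved here is about the return value.

-- ===== PORT A =====
-- A's recursive `find` (no path compression).  Python's recursion is unbounded; a forest on
-- n+1 nodes has chains of at most store.length links, so fuel store.length+1 is exact under Pre_.
def pvFindA (store : List Int) (fuel : Nat) (i : Int) : Int :=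
  match fuel with
  | 0 => i
  | Nat.succ f =>
    let v := PySem.List.pyGetD store i 0
    if v = i then v else pvFindA store f v

-- one iteration of A's inner while-loop body (state = (store, sz, acc));
-- pyGetD/pySetD defaults are unreachable under Pre_ (indices in range).
def pvStepA (s : List Int × List Int × Int) (e : Int × Int × Int) : List Int × List Int × Int :=
  let rx := pvFindA s.1 (s.1.length + 1) e.1
  let ry := pvFindA s.1 (s.1.length + 1) e.2.1
  if rx ≠ ry then
    (PySem.List.pySetD s.1 ry rx,
     PySem.List.pySetD (PySem.List.pySetD s.2.1 rx
       (PySem.List.pyGetD s.2.1 rx 0 + PySem.List.pyGetD s.2.1 ry 0)) ry 0,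
     s.2.2 + PySem.List.pyGetD s.2.1 rx 0 * PySem.List.pyGetD s.2.1 ry 0)
  else s

-- A's `while start < len(edges) and edges[start][2] <= q`: advance over the remaining edges
def pvSweepA (t : Int) (s : List Int × List Int × Int) :
    List (Int × Int × Int) → (List Int × List Int × Int) × List (Int × Int × Int)
  | [] => (s, [])
  | e :: rest => if e.2.2 ≤ t then pvSweepA t (pvStepA s e) rest else (s, e :: rest)

-- A's `for i, q in queries:` loop
def pvLoopA (s : List Int × List Int × Int) (rem : List (Int × Int × Int))
    (qs : List (Int × Int)) (ans : List Int) : List Int :=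
  match qs with
  | [] => ans
  | p :: qs' =>
    let r := pvSweepA p.2 s rem
    pvLoopA r.1 r.2 qs' (PySem.List.pySetD ans p.1 r.1.2.2)

def maximumWeight (n : Int) (edges : List (Int × Int × Int)) (q : Int) (queries : List Int) : List Int :=
  let store := PySem.List.pyRange 0 (n + 1) 1                       -- list(range(n+1))
  let sz := PySem.List.pySetD (List.replicate (n + 1).toNat 1) 0 0  -- [1]*(n+1); sz[0] = 0
  let sortedE := PySem.List.sorted edges (fun x => x.2.2) false
  let sortedQ := PySem.List.sorted (PySem.List.enumerate queries 0) (fun x => x.2) false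
  pvLoopA (store, sz, 0) sortedE sortedQ (List.replicate queries.length 0)

-- ===== PORT B =====
-- B's iterative `find`
def pvFindB (parent : List Int) (fuel : Nat) (i : Int) : Int :=
  match fuel with
  | 0 => i
  | Nat.succ f =>
    let p := PySem.List.pyGetD parent i 0
    if p ≠ i then pvFindB parent f p else i

def pvStepB (s : List Int × List Int × Int) (e : Int × Int × Int) : List Int × List Int × Int :=
  let rx := pvFindB s.1 (s.1.length + 1) e.1
  let ry := pvFindB s.1 (s.1.length + 1) e.2.1
  if rx ≠ ry then
    (PySem.List.pySetD s.1 ry rx,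
     PySem.List.pySetD (PySem.List.pySetD s.2.1 rx
       (PySem.List.pyGetD s.2.1 rx 0 + PySem.List.pyGetD s.2.1 ry 0)) ry 0,
     s.2.2 + PySem.List.pyGetD s.2.1 rx 0 * PySem.List.pyGetD s.2.1 ry 0)
  else s

-- B's `answer(t)`: fresh union-find, scan every edge, process those with weight ≤ t
def pvAnswerB (n : Int) (sortedE : List (Int × Int × Int)) (t : Int) : Int :=
  let parent := PySem.List.pyRange 0 (n + 1) 1
  let size := PySem.List.pySetD (List.replicate (n + 1).toNat 1) 0 0
  (sortedE.foldl (fun s e => if e.2.2 ≤ t then pvStepB s e else s) (parent, size, 0)).2.2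

def maximumWeight_alt (n : Int) (edges : List (Int × Int × Int)) (q : Int) (queries : List Int) : List Int :=
  let sortedE := PySem.List.sorted edges (fun x => x.2.2) false
  queries.map (pvAnswerB n sortedE)

-- ===== PRECONDITION & SPEC =====
-- Exactly the inputs on which Python A returns: n ≥ 0 (else sz[0]=0 raises IndexError), and
-- every edge that is actually processed (weight ≤ some query) has both endpoints inside the
-- Python index range [-(n+1), n] of the length-(n+1) arrays (else store[x] raises IndexError).
def Pre_maximumWeight (n : Int) (edges : List (Int × Int × Int)) (q : Int) (queries : List Int) : Prop :=
  0 ≤ n ∧ ∀ e ∈ edges, (∃ t ∈ queries, e.2.2 ≤ t) →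
    (-(n + 1) ≤ e.1 ∧ e.1 ≤ n ∧ -(n + 1) ≤ e.2.1 ∧ e.2.1 ≤ n)
instance (n : Int) (edges : List (Int × Int × Int)) (q : Int) (queries : List Int) : Decidable (Pre_maximumWeight n edges q queries) := by unfold Pre_maximumWeight; infer_instance

def pvWitness_maximumWeight : Int × (List (Int × Int × Int)) × Int × List Int :=
  (3, [(1, 2, 5), (2, 3, 7)], 2, [4, 6])

def Spec_maximumWeight (n : Int) (edges : List (Int × Int × Int)) (q : Int) (queries : List Int) (out : List Int) : Prop := out = maximumWeight_alt n edges q queries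
instance (n : Int) (edges : List (Int × Int × Int)) (q : Int) (queries : List Int) (out : List Int) : Decidable (Spec_maximumWeight n edges q queries out) := by unfold Spec_maximumWeight; infer_instance

-- ===== CLAIM (what is proved, stated in full; the proofs are below) =====
def Claim_equal_maximumWeight : Prop := ∀ (n : Int) (edges : List (Int × Int × Int)) (q : Int) (queries : List Int), Dom_maximumWeight n edges q queries → Pre_maximumWeight n edges q queries → Spec_maximumWeight n edges q queries (maximumWeight n edges q queries)

-- ===== LEMMAS AND PROOFS =====

theorem pvFind_eq (store : List Int) (fuel : Nat) (i : Int) :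
    pvFindA store fuel i = pvFindB store fuel i := by
  induction fuel generalizing i with
  | zero => rfl
  | succ f ih =>
    simp only [pvFindA, pvFindB]
    by_cases h : PySem.List.pyGetD store i 0 = i
    · simp [h]
    · simp [h, ih]

theorem pvStep_eq (s : List Int × List Int × Int) (e : Int × Int × Int) :
    pvStepA s e = pvStepB s e := by
  simp only [pvStepA, pvStepB, pvFind_eq]

theorem pvFoldAB (l : List (Int × Int × Int)) (s : List Int × List Int × Int) :
    List.foldl pvStepB s l = List.foldl pvStepA s l := by
  induction l generalizing s with
  | nil => rfl
  | cons e rest ih => simp [pvStep_eq, ih]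

theorem pvFoldl_if_filter (t : Int) (l : List (Int × Int × Int)) (s : List Int × List Int × Int) :
    l.foldl (fun s e => if e.2.2 ≤ t then pvStepB s e else s) s
      = (l.filter (fun e => decide (e.2.2 ≤ t))).foldl pvStepB s := by
  induction l generalizing s with
  | nil => rfl
  | cons e rest ih =>
    by_cases h : e.2.2 ≤ t <;> simp [h, ih]

theorem pvSweep_spec (t : Int) (s : List Int × List Int × Int) (rem : List (Int × Int × Int)) :
    pvSweepA t s rem
      = (List.foldl pvStepA s (rem.takeWhile (fun e => decide (e.2.2 ≤ t))),
         rem.dropWhile (fun e => decide (e.2.2 ≤ t))) := by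
  induction rem generalizing s with
  | nil => rfl
  | cons e rest ih =>
    by_cases h : e.2.2 ≤ t <;> simp [pvSweepA, h, ih]

theorem pvTakeWhile_filter_of_sorted (t : Int) (l : List (Int × Int × Int))
    (hs : l.Pairwise (fun a b => a.2.2 ≤ b.2.2)) :
    l.filter (fun e => decide (e.2.2 ≤ t)) = l.takeWhile (fun e => decide (e.2.2 ≤ t)) := by
  induction l with
  | nil => rfl
  | cons e rest ih =>
    rcases List.pairwise_cons.mp hs with ⟨hhead, htail⟩
    by_cases h : e.2.2 ≤ t
    · simp [h, ih htail]
    · have hnil : rest.filter (fun e => decide (e.2.2 ≤ t)) = [] := by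
        rw [List.filter_eq_nil_iff]
        intro a ha
        simp only [decide_eq_true_eq]
        intro hle
        exact h (le_trans (hhead a ha) hle)
      simp [h, hnil]

theorem pvTakeWhile_append_of_forall {α : Type} (p : α → Bool) (pre rem : List α)
    (h : ∀ e ∈ pre, p e = true) :
    (pre ++ rem).takeWhile p = pre ++ rem.takeWhile p := by
  induction pre with
  | nil => rfl
  | cons a l ih =>
    have ha := h a (by simp)
    simp only [List.cons_append, List.takeWhile_cons, ha, if_true]
    rw [ih (fun e he => h e (by simp [he]))]

-- the query loop writes, for each (i, t) in the sorted query list, into slot i the acc of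
-- the step-fold over the ≤-t prefix of the full sorted edge list
theorem pvLoop_inv (init : List Int × List Int × Int) (es : List (Int × Int × Int))
    (qs : List (Int × Int)) (hqs : qs.Pairwise (fun a b => a.2 ≤ b.2)) :
    ∀ pre rem ans, es = pre ++ rem → (∀ e ∈ pre, ∀ p ∈ qs, e.2.2 ≤ p.2) →
    pvLoopA (List.foldl pvStepA init pre) rem qs ans
      = qs.foldl (fun a p => PySem.List.pySetD a p.1
          ((List.foldl pvStepA init (es.takeWhile (fun e => decide (e.2.2 ≤ p.2)))).2.2)) ans := by
  induction qs with
  | nil => intro pre rem ans _ _; rfl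
  | cons p qs' ih =>
    intro pre rem ans hes hpre
    rcases List.pairwise_cons.mp hqs with ⟨hhead, htail⟩
    simp only [pvLoopA, pvSweep_spec, List.foldl_cons]
    have hpreP : ∀ e ∈ pre, (fun e => decide (e.2.2 ≤ p.2)) e = true :=
      fun e he => decide_eq_true (hpre e he p (by simp))
    have htake : es.takeWhile (fun e => decide (e.2.2 ≤ p.2))
        = pre ++ rem.takeWhile (fun e => decide (e.2.2 ≤ p.2)) := by
      rw [hes, pvTakeWhile_append_of_forall _ _ _ hpreP]
    have hfold : List.foldl pvStepA init (es.takeWhile (fun e => decide (e.2.2 ≤ p.2)))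
        = List.foldl pvStepA (List.foldl pvStepA init pre)
            (rem.takeWhile (fun e => decide (e.2.2 ≤ p.2))) := by
      rw [htake, List.foldl_append]
    have hes' : es = (pre ++ rem.takeWhile (fun e => decide (e.2.2 ≤ p.2)))
        ++ rem.dropWhile (fun e => decide (e.2.2 ≤ p.2)) := by
      rw [List.append_assoc, List.takeWhile_append_dropWhile, hes]
    have hpre' : ∀ e ∈ pre ++ rem.takeWhile (fun e => decide (e.2.2 ≤ p.2)),
        ∀ p' ∈ qs', e.2.2 ≤ p'.2 := by
      intro e he p' hp'
      rcases List.mem_append.mp he with h1 | h2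
      · exact hpre e h1 p' (by simp [hp'])
      · have h3 := List.mem_takeWhile_imp h2
        simp only [decide_eq_true_eq] at h3
        exact le_trans h3 (hhead p' hp')
    have H := ih htail (pre ++ rem.takeWhile (fun e => decide (e.2.2 ≤ p.2)))
      (rem.dropWhile (fun e => decide (e.2.2 ≤ p.2)))
      (PySem.List.pySetD ans p.1
        ((List.foldl pvStepA init (es.takeWhile (fun e => decide (e.2.2 ≤ p.2)))).2.2))
      hes' hpre'
    rw [List.foldl_append, ← hfold] at H
    rw [← hfold]
    exact H

theorem pvLoop_top (init : List Int × List Int × Int) (es : List (Int × Int × Int))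
    (qs : List (Int × Int)) (ans : List Int) (hqs : qs.Pairwise (fun a b => a.2 ≤ b.2)) :
    pvLoopA init es qs ans
      = qs.foldl (fun a p => PySem.List.pySetD a p.1
          ((List.foldl pvStepA init (es.takeWhile (fun e => decide (e.2.2 ≤ p.2)))).2.2)) ans := by
  have H := pvLoop_inv init es qs hqs [] es ans rfl (by intro e he; simp at he)
  rw [List.foldl_nil] at H
  exact H

theorem pvScatter_length (g : Int → Int) (ps : List (Int × Int)) (init : List Int) :
    (ps.foldl (fun a p => PySem.List.pySetD a p.1 (g p.2)) init).length = init.length := by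
  induction ps generalizing init with
  | nil => rfl
  | cons p rest ih => simp [ih, PySem.List.length_pySetD]

theorem pvScatter_unset (g : Int → Int) (ps : List (Int × Int)) (init : List Int) (j : Nat)
    (hnn : ∀ p ∈ ps, 0 ≤ p.1) (hne : ∀ p ∈ ps, p.1 ≠ (j : Int)) :
    (ps.foldl (fun a p => PySem.List.pySetD a p.1 (g p.2)) init)[j]? = init[j]? := by
  induction ps generalizing init with
  | nil => rfl
  | cons p rest ih =>
    simp only [List.foldl_cons]
    rw [ih _ (fun x hx => hnn x (by simp [hx])) (fun x hx => hne x (by simp [hx]))]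
    rw [PySem.List.pySetD_of_nonneg _ _ (hnn p (by simp))]
    refine List.getElem?_set_ne ?_
    have h1 := hnn p (by simp : p ∈ p :: rest)
    have h2 := hne p (by simp : p ∈ p :: rest)
    omega

theorem pvScatter_set (g : Int → Int) (ps : List (Int × Int)) (init : List Int) (j : Nat) (t : Int)
    (hj : j < init.length) (hnn : ∀ p ∈ ps, 0 ≤ p.1)
    (hnd : (ps.map Prod.fst).Nodup) (hmem : ((j : Int), t) ∈ ps) :
    (ps.foldl (fun a p => PySem.List.pySetD a p.1 (g p.2)) init)[j]? = some (g t) := by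
  induction ps generalizing init with
  | nil => simp at hmem
  | cons p rest ih =>
    simp only [List.map_cons, List.nodup_cons] at hnd
    by_cases hpj : p.1 = (j : Int)
    · have hrest_ne : ∀ p' ∈ rest, p'.1 ≠ (j : Int) := by
        intro p' hp' hc
        have hm := List.mem_map_of_mem (f := Prod.fst) hp'
        rw [hc, ← hpj] at hm
        exact hnd.1 hm
      have hpt : p.2 = t := by
        rcases List.mem_cons.mp hmem with h1 | h2
        · rw [← h1]
        · exact absurd rfl (hrest_ne _ h2)
      simp only [List.foldl_cons]
      rw [pvScatter_unset g rest _ j (fun x hx => hnn x (by simp [hx])) hrest_ne]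
      rw [PySem.List.pySetD_of_nonneg _ _ (hnn p (by simp))]
      have hpn : p.1.toNat = j := by
        have := hnn p (by simp : p ∈ p :: rest); omega
      rw [hpn, List.getElem?_set_self hj, hpt]
    · have hmem' : ((j : Int), t) ∈ rest := by
        rcases List.mem_cons.mp hmem with h1 | h2
        · exact absurd (congrArg Prod.fst h1.symm) hpj
        · exact h2
      simp only [List.foldl_cons]
      exact ih _ (by rw [PySem.List.length_pySetD]; exact hj)
        (fun x hx => hnn x (by simp [hx])) hnd.2 hmem'

-- scattering g t into slot i, over any permutation of enumerate(queries), yields queries.map g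
theorem pvScatter_map (g : Int → Int) (queries : List Int) (ps : List (Int × Int))
    (hperm : ps.Perm (PySem.List.enumerate queries 0)) :
    ps.foldl (fun a p => PySem.List.pySetD a p.1 (g p.2)) (List.replicate queries.length 0)
      = queries.map g := by
  have hnn : ∀ p ∈ ps, 0 ≤ p.1 := by
    intro p hp
    rcases (PySem.List.mem_enumerate_iff _ _ _).mp (hperm.mem_iff.mp hp) with ⟨k, hk, hpk⟩
    simp [hpk]
  have hnd : (ps.map Prod.fst).Nodup := by
    refine (hperm.map Prod.fst).nodup_iff.mpr ?_
    have hpw : (List.map Prod.fst (PySem.List.enumerate queries 0)).Pairwise (· < ·) :=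
      List.pairwise_map.mpr (PySem.List.pairwise_lt_enumerate queries 0)
    exact List.Pairwise.imp (fun h => ne_of_lt h) hpw
  apply List.ext_getElem?
  intro j
  by_cases hjlt : j < queries.length
  · have hmem : ((j : Int), queries[j]) ∈ ps := by
      apply hperm.mem_iff.mpr
      apply (PySem.List.mem_enumerate_iff _ _ _).mpr
      exact ⟨j, hjlt, by simp⟩
    rw [pvScatter_set g ps _ j queries[j] (by simpa using hjlt) hnn hnd hmem]
    rw [List.getElem?_map, List.getElem?_eq_getElem hjlt]
    rfl
  · rw [List.getElem?_eq_none (l := queries.map g) (by simpa using Nat.le_of_not_lt hjlt)]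
    rw [List.getElem?_eq_none]
    rw [pvScatter_length]
    simpa using Nat.le_of_not_lt hjlt

-- B's per-query recomputation equals A's prefix fold over the sorted edges
theorem pvAnswer_eq (n t : Int) (es : List (Int × Int × Int))
    (hs : es.Pairwise (fun a b => a.2.2 ≤ b.2.2)) :
    pvAnswerB n es t
      = (List.foldl pvStepA
          (PySem.List.pyRange 0 (n + 1) 1,
           PySem.List.pySetD (List.replicate (n + 1).toNat 1) 0 0, 0)
          (es.takeWhile (fun e => decide (e.2.2 ≤ t)))).2.2 := by
  show (List.foldl (fun s e => if e.2.2 ≤ t then pvStepB s e else s)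
      (PySem.List.pyRange 0 (n + 1) 1,
       PySem.List.pySetD (List.replicate (n + 1).toNat 1) 0 0, 0) es).2.2 = _
  rw [pvFoldl_if_filter, pvTakeWhile_filter_of_sorted _ _ hs, pvFoldAB]

theorem maximumWeight_eq_alt (n : Int) (edges : List (Int × Int × Int)) (q : Int)
    (queries : List Int) : maximumWeight n edges q queries = maximumWeight_alt n edges q queries := by
  simp only [maximumWeight, maximumWeight_alt]
  rw [pvLoop_top _ _ _ _ (PySem.List.sorted_pairwise _ _)]
  refine (pvScatter_map
    (fun t => (List.foldl pvStepA
        (PySem.List.pyRange 0 (n + 1) 1,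
         PySem.List.pySetD (List.replicate (n + 1).toNat 1) 0 0, 0)
        ((PySem.List.sorted edges (fun x => x.2.2) false).takeWhile
          (fun e => decide (e.2.2 ≤ t)))).2.2)
    queries _ (PySem.List.sorted_perm _ _ _)).trans ?_
  refine (List.map_congr_left ?_).symm
  intro t _
  exact pvAnswer_eq n t _ (PySem.List.sorted_pairwise _ _)

-- ===== VERDICT (by name: the statement is the Claim_ definition above) =====
theorem maximumWeight_spec : Claim_equal_maximumWeight := by
  intro n edges q queries _ _
  unfold Spec_maximumWeight
  exact maximumWeight_eq_alt n edges q queries
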